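-- pv_equiv track=rewrite | github.com/lucasvoltera/8-puzzle-search | utils/matriz.py | numeroValido
-- ===== SOURCE A (Python) =====
-- def numeroValido(numero):
--     ## verifica se o numero é valido
--     valido = False
--     ## se o tamanho da lista for igual a 9
--     if len(numero) == 9:
--         ## cria um range de 0 a 9
--         ref = list(range(9))
--         valido = True
--         ## para cada numero
--         for i in numero:
--             ## verifica se ele esta fora da lista
--             if int(i) not in ref:
--                 valido = False
--             else:
--                 ## se estiver dentro remove o elemento da lista
--                 ref.remove(int(i))
--     return valido
-- ===== SOURCE B (Python) =====
-- def numeroValido(numero):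
--     ## valid iff it is a permutation of 0..8: sort and compare to range(9)
--     return len(numero) == 9 and sorted(int(i) for i in numero) == list(range(9))
-- ===== Notes on version B (the rewrite author's own statement) =====
-- stated objective: simpler
-- what changed: Replaces the scan-and-remove loop over a shrinking reference list with a single sort-then-compare against list(range(9)), behind the same length guard.
import Mathlib
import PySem

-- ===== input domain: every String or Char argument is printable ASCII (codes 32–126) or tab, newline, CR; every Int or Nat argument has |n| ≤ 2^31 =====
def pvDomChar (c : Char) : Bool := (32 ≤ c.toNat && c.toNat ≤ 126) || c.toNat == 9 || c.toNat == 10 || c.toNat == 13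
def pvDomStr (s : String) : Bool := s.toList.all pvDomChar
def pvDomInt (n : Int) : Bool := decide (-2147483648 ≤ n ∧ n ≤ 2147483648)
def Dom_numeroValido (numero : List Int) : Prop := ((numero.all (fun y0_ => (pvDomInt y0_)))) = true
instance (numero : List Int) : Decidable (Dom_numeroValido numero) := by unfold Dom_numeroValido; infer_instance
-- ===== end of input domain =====

-- B replaces A's scan-and-remove validation with sort-then-compare against range(9) (simpler).

-- ===== PORT A =====
-- loop body: 'if int(i) not in ref: valido = False else: ref.remove(int(i))'
-- (ref.remove is guarded by the membership test, so it is List.erase, first occurrence)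
def pvStep (st : List Int × Bool) (i : Int) : List Int × Bool :=
  if ¬ (i ∈ st.1) then (st.1, false) else (st.1.erase i, st.2)

def numeroValido (numero : List Int) : Bool :=
  -- valido = False
  let valido := false
  if numero.length == 9 then
    -- ref = list(range(9)); valido = True; for i in numero: …
    (numero.foldl pvStep (PySem.List.pyRange 0 9 1, true)).2
  else valido

-- ===== PORT B =====
def numeroValido_alt (numero : List Int) : Bool :=
  numero.length == 9 &&
    (PySem.List.sorted numero (fun x => x) false == PySem.List.pyRange 0 9 1)

-- ===== PRECONDITION & SPEC =====
def Spec_numeroValido (numero : List Int) (out : Bool) : Prop := out = numeroValido_alt numero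
instance (numero : List Int) (out : Bool) : Decidable (Spec_numeroValido numero out) := by unfold Spec_numeroValido; infer_instance

-- ===== CLAIM (what is proved, stated in full; the proofs are below) =====
def Claim_equal_numeroValido : Prop := ∀ (numero : List Int), Dom_numeroValido numero → Spec_numeroValido numero (numeroValido numero)

-- ===== LEMMAS AND PROOFS =====

-- once valido is False it stays False
theorem pvLoop_false (xs : List Int) (ref : List Int) :
    (xs.foldl pvStep (ref, false)).2 = false := by
  induction xs generalizing ref with
  | nil => rfl
  | cons i xs ih =>
    simp only [List.foldl_cons, pvStep]
    split_ifs <;> exact ih _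

-- the loop succeeds from (ref, true) iff xs is a sub-multiset of ref
theorem pvLoop_true (xs : List Int) (ref : List Int) :
    (xs.foldl pvStep (ref, true)).2 = true ↔ ∀ a, xs.count a ≤ ref.count a := by
  induction xs generalizing ref with
  | nil => simp
  | cons i xs ih =>
    simp only [List.foldl_cons, pvStep]
    by_cases hmem : i ∈ ref
    · rw [if_neg (not_not_intro hmem)]
      rw [ih]
      have hcnt : 1 ≤ ref.count i := List.one_le_count_iff.mpr hmem
      constructor
      · intro h a
        have := h a
        rw [List.count_erase] at this
        rw [List.count_cons]
        simp only [beq_iff_eq] at this ⊢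
        by_cases hai : i = a
        · subst hai
          rw [if_pos rfl] at this ⊢
          omega
        · rw [if_neg hai] at this ⊢
          omega
      · intro h a
        have := h a
        rw [List.count_erase]
        rw [List.count_cons] at this
        simp only [beq_iff_eq] at this ⊢
        by_cases hai : i = a
        · subst hai
          rw [if_pos rfl] at this ⊢
          omega
        · rw [if_neg hai] at this ⊢
          omega
    · rw [if_pos hmem, pvLoop_false]
      simp only [Bool.false_eq_true, false_iff]
      intro hall
      have := hall i
      rw [List.count_cons_self, List.count_eq_zero.mpr hmem] at this
      omega

theorem numeroValido_spec : Claim_equal_numeroValido := by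
  intro numero _
  unfold Spec_numeroValido numeroValido numeroValido_alt
  by_cases hlen : numero.length = 9
  · simp only [hlen, beq_self_eq_true, if_true, Bool.true_and]
    have hperm_iff :
        ((numero.foldl pvStep (PySem.List.pyRange 0 9 1, true)).2 = true)
          ↔ numero.Perm (PySem.List.pyRange 0 9 1) := by
      rw [pvLoop_true, ← List.subperm_iff_count]
      constructor
      · intro h
        exact h.perm_of_length_le (by
          rw [hlen, PySem.List.length_pyRange_one]; rfl)
      · exact List.Perm.subperm
    have hsorted_iff :
        (PySem.List.sorted numero (fun x => x) false = PySem.List.pyRange 0 9 1)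
          ↔ numero.Perm (PySem.List.pyRange 0 9 1) := by
      constructor
      · intro h
        have hp := PySem.List.sorted_perm (xs := numero) (key := fun x => x) (rev := false)
        rw [h] at hp
        exact hp.symm
      · intro h
        exact PySem.List.sorted_eq_of_perm_of_pairwise_lt numero
          (PySem.List.pyRange 0 9 1) (fun x => x)
          h.symm (PySem.List.pairwise_lt_pyRange_one 0 9)
    rw [Bool.eq_iff_iff]
    rw [hperm_iff, beq_iff_eq, hsorted_iff]
  · have : (numero.length == 9) = false := by simpa using hlen
    simp [this]
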